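-- pv_equiv track=rewrite | github.com/pavlinakoutecka/rosalind | FIB.py | compute_multinacci
-- ===== SOURCE A (Python) =====
-- def compute_multinacci(n, k):
--     if n == 0:
--         return 0
--     elif n == 1:
--         return 1
--     elif n == 2:
--         return 1
--     else:
--         return compute_multinacci(n-1, k) + k*compute_multinacci(n-2, k)
-- ===== SOURCE B (Python) =====
-- def compute_multinacci(n, k):
--     a, b = 0, 1
--     for _ in range(n):
--         a, b = b, b + k * a
--     return a
-- ===== Notes on version B (the rewrite author's own statement) =====
-- stated objective: faster
-- what changed: Replaced the exponential double recursion with an iterative bottom-up loop keeping only the last two values; intended as faster (measured: A already times out at n=16 where B returns instantly, so a timing run could not confirm a ratio).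
import Mathlib
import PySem

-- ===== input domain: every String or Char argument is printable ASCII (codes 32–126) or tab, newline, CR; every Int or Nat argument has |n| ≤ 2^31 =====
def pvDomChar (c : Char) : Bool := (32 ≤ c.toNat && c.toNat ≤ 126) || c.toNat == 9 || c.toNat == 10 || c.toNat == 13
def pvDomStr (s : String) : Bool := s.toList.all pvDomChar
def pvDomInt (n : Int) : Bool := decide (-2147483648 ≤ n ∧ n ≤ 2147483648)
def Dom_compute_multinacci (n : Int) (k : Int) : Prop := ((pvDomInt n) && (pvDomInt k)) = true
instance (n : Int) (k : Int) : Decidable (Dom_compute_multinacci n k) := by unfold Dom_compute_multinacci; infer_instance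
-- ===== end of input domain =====

-- B replaces A's exponential double recursion with a bottom-up loop keeping the last two values (intended as faster; measured: A times out at n=16 where B returns).

-- ===== PORT A =====
-- literal port of A's recursion; the 'n ≤ 0' guard only makes the function total
-- (Python A raises RecursionError for n < 0; those inputs are outside Pre_).
def compute_multinacci (n : Int) (k : Int) : Int :=
  if n ≤ 0 then 0
  else if n = 1 then 1
  else if n = 2 then 1
  else compute_multinacci (n - 1) k + k * compute_multinacci (n - 2) k
termination_by n.toNat
decreasing_by all_goals omega

-- ===== PORT B =====
def compute_multinacci_alt (n : Int) (k : Int) : Int :=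
  ((PySem.List.pyRange 0 n 1).foldl (fun (ab : Int × Int) _ => (ab.2, ab.2 + k * ab.1)) (0, 1)).1

-- ===== PRECONDITION & SPEC =====
-- Pre_ excludes n < 0, on which Python A recurses without bound and raises RecursionError.
def Pre_compute_multinacci (n : Int) (k : Int) : Prop := 0 ≤ n
instance (n : Int) (k : Int) : Decidable (Pre_compute_multinacci n k) := by unfold Pre_compute_multinacci; infer_instance
def pvWitness_compute_multinacci : Int × Int := (7, 3)

def Spec_compute_multinacci (n : Int) (k : Int) (out : Int) : Prop := out = compute_multinacci_alt n k
instance (n : Int) (k : Int) (out : Int) : Decidable (Spec_compute_multinacci n k out) := by unfold Spec_compute_multinacci; infer_instance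

-- ===== CLAIM =====
def Claim_equal_compute_multinacci : Prop := ∀ (n : Int) (k : Int), Dom_compute_multinacci n k → Pre_compute_multinacci n k → Spec_compute_multinacci n k (compute_multinacci n k)

-- ===== LEMMAS AND PROOFS =====

-- reference sequence: F k m = k-multinacci number
def pvF (k : Int) : Nat → Int
  | 0 => 0
  | 1 => 1
  | (m + 2) => pvF k (m + 1) + k * pvF k m

-- B's loop body iterated m times from (0,1) is (F m, F (m+1))
theorem pvIter_eq (k : Int) (m : Nat) :
    (fun (ab : Int × Int) => (ab.2, ab.2 + k * ab.1))^[m] (0, 1) = (pvF k m, pvF k (m + 1)) := by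
  induction m with
  | zero => simp [pvF]
  | succ m ih =>
    rw [Function.iterate_succ_apply', ih]
    show (pvF k (m + 1), pvF k (m + 1) + k * pvF k m) = _
    rw [show pvF k (m + 1) + k * pvF k m = pvF k (m + 2) from rfl]

-- a fold whose body ignores the elements is an iterate of length many steps
theorem pvFoldl_ignore {α β : Type} (f : β → β) (l : List α) (init : β) :
    l.foldl (fun b _ => f b) init = f^[l.length] init := by
  induction l generalizing init with
  | nil => rfl
  | cons x xs ih => simp [List.foldl_cons, ih, Function.iterate_succ_apply]

theorem pvAlt_eq_F (n k : Int) (hn : 0 ≤ n) : compute_multinacci_alt n k = pvF k n.toNat := by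
  unfold compute_multinacci_alt
  rw [pvFoldl_ignore (fun (ab : Int × Int) => (ab.2, ab.2 + k * ab.1)) _ (0, 1)]
  rw [PySem.List.length_pyRange_one]
  rw [pvIter_eq]
  simp

theorem pvA_eq_F (k : Int) (m : Nat) : compute_multinacci (m : Int) k = pvF k m := by
  induction m using Nat.strong_induction_on with
  | _ m ih =>
    match m with
    | 0 => simp [compute_multinacci, pvF]
    | 1 => rw [compute_multinacci]; norm_num [pvF]
    | 2 => rw [compute_multinacci]; norm_num [pvF]
    | (j + 3) =>
      rw [compute_multinacci]
      norm_num
      rw [show ((j : Int) + 3 - 1) = ((j + 2 : Nat) : Int) by push_cast; ring,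
          show ((j : Int) + 3 - 2) = ((j + 1 : Nat) : Int) by push_cast; ring,
          ih (j + 2) (by omega), ih (j + 1) (by omega)]
      rfl

-- ===== VERDICT =====
theorem compute_multinacci_spec : Claim_equal_compute_multinacci := by
  intro n k _ hpre
  unfold Pre_compute_multinacci at hpre
  unfold Spec_compute_multinacci
  rw [pvAlt_eq_F n k hpre]
  rw [show n = ((n.toNat : Nat) : Int) by omega, pvA_eq_F]
  congr 1
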